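-- pv_equiv track=rewrite | github.com/joshuarocksolid/ChoreBoyCodeStudio | app/editors/syntax_python.py | _locate_string_start
-- ===== SOURCE A (Python) =====
-- _STRING_PREFIX_CHARS = frozenset("rRuUbBfF")
--
-- def _locate_string_start(text: str, index: int) -> int | None:
--     if index >= len(text):
--         return None
--     character = text[index]
--     if character in {"'", '"'}:
--         return index
--     if character not in _STRING_PREFIX_CHARS:
--         return None
--     for prefix_length in range(1, 4):
--         quote_index = index + prefix_length
--         if quote_index >= len(text):
--             return None
--         prefix_text = text[index:quote_index]
--         if any(ch not in _STRING_PREFIX_CHARS for ch in prefix_text):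
--             return None
--         if text[quote_index] in {"'", '"'}:
--             return index
--     return None
-- ===== SOURCE B (Python) =====
-- import re
--
-- _STRING_START_RE = re.compile(r"[rRuUbBfF]{0,3}['\"]")
--
-- def _locate_string_start(text: str, index: int) -> int | None:
--     return index if _STRING_START_RE.match(text, index) else None
-- ===== Notes on version B (the rewrite author's own statement) =====
-- stated objective: idiomatic
-- what changed: Replaces the manual prefix loop (with its repeated slice re-scans and bounds checks) by a single anchored regular-expression match of the pattern [rRuUbBfF]{0,3}['"] at the given position.
-- outside the precondition, e.g. on _locate_string_start("x'", -1): A returns -1, B returns None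
import Mathlib
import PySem

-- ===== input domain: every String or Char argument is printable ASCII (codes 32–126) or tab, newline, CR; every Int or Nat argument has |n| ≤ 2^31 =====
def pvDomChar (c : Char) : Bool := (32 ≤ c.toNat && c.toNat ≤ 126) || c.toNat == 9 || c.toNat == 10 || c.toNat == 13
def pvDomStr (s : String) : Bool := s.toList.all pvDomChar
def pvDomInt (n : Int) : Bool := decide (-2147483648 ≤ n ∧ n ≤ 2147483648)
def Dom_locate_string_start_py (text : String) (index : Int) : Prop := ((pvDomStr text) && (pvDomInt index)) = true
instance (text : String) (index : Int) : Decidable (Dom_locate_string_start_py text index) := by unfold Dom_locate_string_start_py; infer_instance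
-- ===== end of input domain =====

-- B replaces A's manual bounded prefix loop (repeated slice re-scans) by a single anchored
-- regex-style match of [rRuUbBfF]{0,3}['"] at the position; idiomatic, same cost.


-- character classes shared by both sources (_STRING_PREFIX_CHARS and the quote set)
def pvIsQuote (c : Char) : Bool := c == '\'' || c == '"'
def pvIsPfx (c : Char) : Bool :=
  c == 'r' || c == 'R' || c == 'u' || c == 'U' || c == 'b' || c == 'B' || c == 'f' || c == 'F'
-- ===== PORT A =====
-- the 'for prefix_length in range(1, 4)' loop, on the remaining list of prefix lengths
def pvALoop (cs : List Char) (index : Int) : List Int → Option Int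
  | [] => none
  | p :: ps =>
    let quoteIndex := index + p
    if quoteIndex ≥ (cs.length : Int) then none
    else if (PySem.List.slice cs (some index) (some quoteIndex)).any (fun ch => !pvIsPfx ch) then none
    else
      match PySem.List.pyGet? cs quoteIndex with
      | none => none
      | some c => if pvIsQuote c then some index else pvALoop cs index ps
def locate_string_start_py (text : String) (index : Int) : Option Int :=
  let cs := text.toList
  if index ≥ (cs.length : Int) then none
  else
    match PySem.List.pyGet? cs index with
    | none => none
    | some character =>
      if pvIsQuote character then some index
      else if !pvIsPfx character then none
      else pvALoop cs index [1, 2, 3]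
-- ===== PORT B =====
-- Hand port of re.compile(r"[rRuUbBfF]{0,3}['\"]").match(text, index): a greedy bounded
-- repetition with backtracking, exact for this two-element pattern. `k` is the remaining
-- repeat budget: try to consume a prefix char and recurse, else accept a quote here; fail at end.
def pvReMatch : Nat → List Char → Bool
  | _, [] => false
  | 0, c :: _ => pvIsQuote c
  | k + 1, c :: rest => (pvIsPfx c && pvReMatch k rest) || pvIsQuote c
def locate_string_start_py_alt (text : String) (index : Int) : Option Int :=
  -- re.match clamps a negative pos to 0, which is exactly Int.toNat; a pos past the end leaves no text
  if pvReMatch 3 (text.toList.drop index.toNat) then some index else none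


-- ===== PRECONDITION & SPEC =====
-- Pre_ restricts to the scanner's natural domain of nonnegative positions: for index < -len(text)
-- A raises IndexError, and for -len(text) ≤ index < 0 A's value is an accident of Python's
-- negative-index wraparound (its slice endpoints cross zero), outside the function's purpose.
def Pre_locate_string_start_py (_text : String) (index : Int) : Prop := 0 ≤ index
instance (text : String) (index : Int) : Decidable (Pre_locate_string_start_py text index) := by unfold Pre_locate_string_start_py; infer_instance
def pvWitness_locate_string_start_py : String × Int := ("rb'x'", 0)

def Spec_locate_string_start_py (text : String) (index : Int) (out : Option Int) : Prop := out = locate_string_start_py_alt text index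
instance (text : String) (index : Int) (out : Option Int) : Decidable (Spec_locate_string_start_py text index out) := by unfold Spec_locate_string_start_py; infer_instance

-- ===== CLAIM (what is proved, stated in full; the proofs are below) =====
def Claim_equal_locate_string_start_py : Prop := ∀ (text : String) (index : Int), Dom_locate_string_start_py text index → Pre_locate_string_start_py text index → Spec_locate_string_start_py text index (locate_string_start_py text index)

-- ===== LEMMAS AND PROOFS =====
theorem pvALoop_cons (cs : List Char) (index p : Int) (ps : List Int) :
    pvALoop cs index (p :: ps) =
      (if index + p ≥ (cs.length : Int) then none
       else if (PySem.List.slice cs (some index) (some (index + p))).any (fun ch => !pvIsPfx ch) then none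
       else
         match PySem.List.pyGet? cs (index + p) with
         | none => none
         | some c => if pvIsQuote c then some index else pvALoop cs index ps) := rfl
theorem pv_any_not (l : List Char) : (l.any fun ch => !pvIsPfx ch) = !l.all pvIsPfx := by
  induction l with
  | nil => rfl
  | cons a t ih => simp [List.any_cons, List.all_cons, ih, Bool.not_and]
theorem pv_all_take_succ (cs : List Char) (n k : Nat) (h : n + k < cs.length) :
    ((cs.drop n).take (k + 1)).all pvIsPfx
      = (((cs.drop n).take k).all pvIsPfx && pvIsPfx cs[n + k]) := by
  rw [List.take_add_one]
  simp [List.getElem?_drop, List.getElem?_eq_getElem h]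

theorem pvALoop3 (cs : List Char) (n : Nat)
    (hpre : ((cs.drop n).take 3).all pvIsPfx = true) :
    pvALoop cs (n : Int) [3] =
      if pvReMatch 0 (cs.drop (n + 3)) then some (n : Int) else none := by
  have hcast : (n : Int) + 3 = ((n + 3 : Nat) : Int) := by push_cast; ring
  rw [pvALoop_cons]
  simp only [hcast, PySem.List.slice_natCast, PySem.List.pyGet?_natCast]
  by_cases hlen : n + 3 < cs.length
  · rw [if_neg (by push_cast; omega)]
    rw [List.drop_eq_getElem_cons hlen]
    have hs : (cs.drop n).take (n + 3 - n) = (cs.drop n).take 3 := by norm_num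
    rw [hs, pv_any_not, hpre]
    rw [if_neg (by simp)]
    rw [List.getElem?_eq_getElem hlen]
    simp only [pvReMatch]
    by_cases hq : pvIsQuote cs[n + 3] = true
    · simp [hq]
    · simp [hq, pvALoop]
  · rw [if_pos (by push_cast; omega)]
    rw [List.drop_eq_nil_of_le (by omega)]
    simp [pvReMatch]

theorem pvALoop2 (cs : List Char) (n : Nat)
    (hpre : ((cs.drop n).take 2).all pvIsPfx = true) :
    pvALoop cs (n : Int) [2, 3] =
      if pvReMatch 1 (cs.drop (n + 2)) then some (n : Int) else none := by
  have hcast : (n : Int) + 2 = ((n + 2 : Nat) : Int) := by push_cast; ring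
  rw [pvALoop_cons]
  simp only [hcast, PySem.List.slice_natCast, PySem.List.pyGet?_natCast]
  by_cases hlen : n + 2 < cs.length
  · rw [if_neg (by push_cast; omega)]
    rw [List.drop_eq_getElem_cons hlen]
    have hs : (cs.drop n).take (n + 2 - n) = (cs.drop n).take 2 := by norm_num
    rw [hs, pv_any_not, hpre]
    rw [if_neg (by simp)]
    rw [List.getElem?_eq_getElem hlen]
    simp only [pvReMatch]
    by_cases hq : pvIsQuote cs[n + 2] = true
    · simp [hq]
    · rw [if_neg hq]
      by_cases hp : pvIsPfx cs[n + 2] = true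
      · have hpre3 : ((cs.drop n).take 3).all pvIsPfx = true := by
          rw [pv_all_take_succ cs n 2 hlen, hpre, hp]; rfl
        have h33 : n + 2 + 1 = n + 3 := by omega
        rw [h33, pvALoop3 cs n hpre3]
        simp [hq, hp]
      · simp only [Bool.not_eq_true] at hp
        have h33 : n + 2 + 1 = n + 3 := by omega
        rw [h33, pvALoop_cons]
        have hcast3 : (n : Int) + 3 = ((n + 3 : Nat) : Int) := by push_cast; ring
        simp only [hcast3, PySem.List.slice_natCast]
        by_cases hlen3 : n + 3 < cs.length
        · rw [if_neg (by push_cast; omega)]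
          have hs3 : (cs.drop n).take (n + 3 - n) = (cs.drop n).take 3 := by norm_num
          rw [hs3, pv_any_not, pv_all_take_succ cs n 2 hlen, hpre]
          simp [hq, hp]
        · rw [if_pos (by push_cast; omega)]
          simp [hq, hp]
  · rw [if_pos (by push_cast; omega)]
    rw [List.drop_eq_nil_of_le (by omega)]
    simp [pvReMatch]

theorem pvALoop1 (cs : List Char) (n : Nat)
    (hpre : ((cs.drop n).take 1).all pvIsPfx = true) :
    pvALoop cs (n : Int) [1, 2, 3] =
      if pvReMatch 2 (cs.drop (n + 1)) then some (n : Int) else none := by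
  have hcast : (n : Int) + 1 = ((n + 1 : Nat) : Int) := by push_cast; ring
  rw [pvALoop_cons]
  simp only [hcast, PySem.List.slice_natCast, PySem.List.pyGet?_natCast]
  by_cases hlen : n + 1 < cs.length
  · rw [if_neg (by push_cast; omega)]
    rw [List.drop_eq_getElem_cons hlen]
    have hs : (cs.drop n).take (n + 1 - n) = (cs.drop n).take 1 := by norm_num
    rw [hs, pv_any_not, hpre]
    rw [if_neg (by simp)]
    rw [List.getElem?_eq_getElem hlen]
    simp only [pvReMatch]
    by_cases hq : pvIsQuote cs[n + 1] = true
    · simp [hq]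
    · rw [if_neg hq]
      by_cases hp : pvIsPfx cs[n + 1] = true
      · have hpre2 : ((cs.drop n).take 2).all pvIsPfx = true := by
          rw [pv_all_take_succ cs n 1 hlen, hpre, hp]; rfl
        have h22 : n + 1 + 1 = n + 2 := by omega
        rw [h22, pvALoop2 cs n hpre2]
        simp [hq, hp]
      · simp only [Bool.not_eq_true] at hp
        have h22 : n + 1 + 1 = n + 2 := by omega
        rw [h22, pvALoop_cons]
        have hcast2 : (n : Int) + 2 = ((n + 2 : Nat) : Int) := by push_cast; ring
        simp only [hcast2, PySem.List.slice_natCast]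
        by_cases hlen2 : n + 2 < cs.length
        · rw [if_neg (by push_cast; omega)]
          have hs2 : (cs.drop n).take (n + 2 - n) = (cs.drop n).take 2 := by norm_num
          rw [hs2, pv_any_not, pv_all_take_succ cs n 1 hlen, hpre]
          -- slice any-check fires: the loop returns none before reaching the third length
          simp [hq, hp]
        · rw [if_pos (by push_cast; omega)]
          simp [hq, hp]
  · rw [if_pos (by push_cast; omega)]
    rw [List.drop_eq_nil_of_le (by omega)]
    simp [pvReMatch]

theorem pv_A_eq (text : String) (n : Nat) :
    locate_string_start_py text (n : Int) =
      if pvReMatch 3 (text.toList.drop n) then some (n : Int) else none := by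
  unfold locate_string_start_py
  by_cases hlen : n < text.toList.length
  · rw [if_neg (by omega)]
    simp only [PySem.List.pyGet?_natCast]
    rw [List.getElem?_eq_getElem hlen]
    rw [List.drop_eq_getElem_cons hlen]
    simp only [pvReMatch]
    by_cases hq : pvIsQuote text.toList[n] = true
    · simp [hq]
    · by_cases hp : pvIsPfx text.toList[n] = true
      · have hpre1 : ((text.toList.drop n).take 1).all pvIsPfx = true := by
          rw [List.drop_eq_getElem_cons hlen]
          simp [List.take_add_one, List.getElem?_eq_getElem hlen, hp]
        rw [pvALoop1 text.toList n hpre1]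
        simp [hq, hp]
      · simp only [Bool.not_eq_true] at hp
        simp [hq, hp]
  · rw [if_pos (by omega)]
    rw [List.drop_eq_nil_of_le (by omega)]
    simp [pvReMatch]


-- ===== VERDICT (by name: the statement is the Claim_ definition above) =====
theorem locate_string_start_py_spec : Claim_equal_locate_string_start_py := by
  intro text index _ h0
  unfold Spec_locate_string_start_py
  obtain ⟨n, rfl⟩ : ∃ n : Nat, (n : Int) = index := ⟨index.toNat, Int.toNat_of_nonneg h0⟩
  rw [pv_A_eq]
  unfold locate_string_start_py_alt
  simp
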